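-- pv_equiv track=rewrite | github.com/BharathKumar-Bandaru/MWDB_Project_3 | vafiles.py | compute_number_of_bits
-- ===== SOURCE A (Python) =====
-- import math
--
-- def compute_number_of_bits(b, d):
--     # v = number of vectors
--     # b = number of bits
--     # d = number of dimensions
--     bits = []
--
--     for j in range(1, d+1):
--         if j <= b%d:
--             bj = math.floor(b/d) + 1;
--         else:
--             bj = math.floor(b/d)+0;
--         bits.append(bj)
--
--     return bits
-- ===== SOURCE B (Python) =====
-- def compute_number_of_bits(b, d):
--     # Peel off one dimension at a time: each step takes the ceiling of the
--     # remaining bits over the remaining dimensions and subtracts it.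
--     # No modulus and no per-index branch; the state (rb, rd) shrinks.
--     bits = []
--     rb, rd = b, d
--     while rd > 0:
--         h = -((-rb) // rd)   # ceil(rb / rd) exactly, in integer arithmetic
--         bits.append(h)
--         rb -= h
--         rd -= 1
--     return bits
-- ===== Notes on version B (the rewrite author's own statement) =====
-- stated objective: alternative
-- what changed: Replaces A's fixed floor/mod per-index branch by a stateful peeling loop: each step emits the ceiling of the remaining bits over the remaining dimensions and subtracts it, so no modulus or branch is ever computed.
import Mathlib
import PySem

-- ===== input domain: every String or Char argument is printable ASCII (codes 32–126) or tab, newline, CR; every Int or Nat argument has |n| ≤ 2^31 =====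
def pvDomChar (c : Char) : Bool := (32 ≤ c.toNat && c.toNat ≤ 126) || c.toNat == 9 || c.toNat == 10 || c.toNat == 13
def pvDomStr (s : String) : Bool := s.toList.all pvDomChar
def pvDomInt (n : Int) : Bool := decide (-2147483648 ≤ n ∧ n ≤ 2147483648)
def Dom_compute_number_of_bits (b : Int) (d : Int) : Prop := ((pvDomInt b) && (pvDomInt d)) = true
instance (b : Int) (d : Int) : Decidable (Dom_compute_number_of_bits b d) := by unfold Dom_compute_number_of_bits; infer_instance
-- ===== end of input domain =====

-- B replaces A's fixed floor/mod with a per-index branch by a stateful peeling loop: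
-- each step emits the ceiling of the remaining bits over the remaining dimensions (objective: alternative).

-- ===== PORT A =====
-- math.floor(b/d) is ported as floored integer division: for |b|,|d| ≤ 2^31 the float
-- quotient b/d has rounding error < 1/d, so math.floor(b/d) == b//d exactly on Dom.
def compute_number_of_bits (b : Int) (d : Int) : List Int :=
  (PySem.List.pyRange 1 (d + 1) 1).foldl
    (fun bits j =>
      let bj := if j ≤ PySem.Int.mod b d
                then PySem.Int.floordiv b d + 1
                else PySem.Int.floordiv b d + 0
      bits ++ [bj]) []

-- ===== PORT B =====
-- the while loop of Source B: state (bits, rb, rd), loop while rd > 0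
def compute_number_of_bits_altAux (bits : List Int) (rb rd : Int) : List Int :=
  if 0 < rd then
    let h := -(PySem.Int.floordiv (-rb) rd)
    compute_number_of_bits_altAux (bits ++ [h]) (rb - h) (rd - 1)
  else bits
termination_by rd.toNat
decreasing_by omega

def compute_number_of_bits_alt (b : Int) (d : Int) : List Int :=
  compute_number_of_bits_altAux [] b d

-- ===== PRECONDITION & SPEC =====
def Spec_compute_number_of_bits (b : Int) (d : Int) (out : List Int) : Prop := out = compute_number_of_bits_alt b d
instance (b : Int) (d : Int) (out : List Int) : Decidable (Spec_compute_number_of_bits b d out) := by unfold Spec_compute_number_of_bits; infer_instance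

-- ===== CLAIM (what is proved, stated in full; the proofs are below) =====
def Claim_equal_compute_number_of_bits : Prop := ∀ (b : Int) (d : Int), Dom_compute_number_of_bits b d → Spec_compute_number_of_bits b d (compute_number_of_bits b d)

-- ===== LEMMAS AND PROOFS =====

-- canonical result: r copies of q+1 followed by d-r copies of q (empty if d ≤ 0)
def pvCanon (b d : Int) : List Int :=
  if 0 < d then
    List.replicate (PySem.Int.mod b d).toNat (PySem.Int.floordiv b d + 1)
      ++ List.replicate (d - PySem.Int.mod b d).toNat (PySem.Int.floordiv b d)
  else []

-- append-accumulate fold = map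
theorem pv_foldl_append_map (f : Int → Int) (l : List Int) (acc : List Int) :
    l.foldl (fun bits j => bits ++ [f j]) acc = acc ++ l.map f := by
  induction l generalizing acc with
  | nil => simp
  | cons x xs ih => simp [List.foldl, ih, List.append_assoc]

-- A computes the canonical list
theorem pv_A_canon (b d : Int) : compute_number_of_bits b d = pvCanon b d := by
  unfold compute_number_of_bits pvCanon
  by_cases hd : d ≤ 0
  · simp [if_neg (by omega : ¬ 0 < d), PySem.List.pyRange_one_eq_nil (by omega : d + 1 ≤ 1)]
  · rw [not_le] at hd
    simp only [if_pos hd]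
    set q := PySem.Int.floordiv b d with hq
    set r := PySem.Int.mod b d with hr
    have hr0 : 0 ≤ r := PySem.Int.mod_nonneg b hd
    have hrd : r < d := PySem.Int.mod_lt b hd
    rw [pv_foldl_append_map (fun j => if j ≤ r then q + 1 else q + 0)]
    rw [PySem.List.pyRange_one]
    have hsplit : (d + 1 - 1).toNat = r.toNat + (d - r).toNat := by omega
    rw [List.nil_append, List.map_map, hsplit, List.range_add, List.map_append, List.map_map]
    congr 1
    · rw [List.eq_replicate_iff]
      refine ⟨by simp, ?_⟩
      intro x hx
      simp only [List.mem_map, List.mem_range] at hx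
      obtain ⟨k, hk, rfl⟩ := hx
      simp only [Function.comp]
      rw [if_pos (by omega)]
    · rw [List.eq_replicate_iff]
      refine ⟨by simp, ?_⟩
      intro x hx
      simp only [List.mem_map, List.mem_range] at hx
      obtain ⟨k, hk, rfl⟩ := hx
      simp only [Function.comp]
      rw [if_neg (by omega)]
      simp

-- the ceiling step of B: -((-rb)//rd) is q+1 when r > 0, else q
theorem pv_ceil_step (rb rd : Int) (hd : 0 < rd) :
    -(PySem.Int.floordiv (-rb) rd)
      = if 0 < PySem.Int.mod rb rd then PySem.Int.floordiv rb rd + 1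
        else PySem.Int.floordiv rb rd := by
  have hmul := PySem.Int.floordiv_mul_add_mod rb rd
  have hr0 : 0 ≤ PySem.Int.mod rb rd := PySem.Int.mod_nonneg rb hd
  have hrd : PySem.Int.mod rb rd < rd := PySem.Int.mod_lt rb hd
  split_ifs with h
  · rw [PySem.Int.neg_floordiv_neg_eq_iff_of_pos hd]
    constructor <;> nlinarith
  · rw [PySem.Int.neg_floordiv_neg_eq_iff_of_pos hd]
    constructor <;> nlinarith

-- peeling one ceiling off the canonical list leaves the canonical list of the rest
theorem pv_canon_step (rb rd : Int) (hd : 0 < rd) :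
    pvCanon rb rd
      = (-(PySem.Int.floordiv (-rb) rd))
          :: pvCanon (rb - (-(PySem.Int.floordiv (-rb) rd))) (rd - 1) := by
  have hmul := PySem.Int.floordiv_mul_add_mod rb rd
  have hr0 : 0 ≤ PySem.Int.mod rb rd := PySem.Int.mod_nonneg rb hd
  have hrd : PySem.Int.mod rb rd < rd := PySem.Int.mod_lt rb hd
  have hceil := pv_ceil_step rb rd hd
  by_cases hone : 0 < rd - 1
  · by_cases hrpos : 0 < PySem.Int.mod rb rd
    · rw [if_pos hrpos] at hceil
      rw [hceil]
      have hq' : PySem.Int.floordiv (rb - (PySem.Int.floordiv rb rd + 1)) (rd - 1)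
          = PySem.Int.floordiv rb rd := by
        rw [PySem.Int.floordiv_eq_iff_of_pos hone]
        constructor <;> nlinarith
      have hring : PySem.Int.floordiv rb rd * (rd - 1)
          = PySem.Int.floordiv rb rd * rd - PySem.Int.floordiv rb rd := by ring
      have hr' : PySem.Int.mod (rb - (PySem.Int.floordiv rb rd + 1)) (rd - 1)
          = PySem.Int.mod rb rd - 1 := by
        have h2 := PySem.Int.floordiv_mul_add_mod (rb - (PySem.Int.floordiv rb rd + 1)) (rd - 1)
        rw [hq'] at h2
        linarith
      unfold pvCanon
      rw [if_pos hd, if_pos hone, hq', hr']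
      have h1 : (PySem.Int.mod rb rd).toNat = (PySem.Int.mod rb rd - 1).toNat + 1 := by omega
      have h2 : (rd - PySem.Int.mod rb rd).toNat
          = (rd - 1 - (PySem.Int.mod rb rd - 1)).toNat := by omega
      rw [h1, h2, List.replicate_succ]
      simp
    · rw [if_neg hrpos] at hceil
      rw [hceil]
      have hr0' : PySem.Int.mod rb rd = 0 := by omega
      have hq' : PySem.Int.floordiv (rb - PySem.Int.floordiv rb rd) (rd - 1)
          = PySem.Int.floordiv rb rd := by
        rw [PySem.Int.floordiv_eq_iff_of_pos hone]
        constructor <;> nlinarith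
      have hring : PySem.Int.floordiv rb rd * (rd - 1)
          = PySem.Int.floordiv rb rd * rd - PySem.Int.floordiv rb rd := by ring
      have hr' : PySem.Int.mod (rb - PySem.Int.floordiv rb rd) (rd - 1) = 0 := by
        have h2 := PySem.Int.floordiv_mul_add_mod (rb - PySem.Int.floordiv rb rd) (rd - 1)
        rw [hq'] at h2
        linarith
      unfold pvCanon
      rw [if_pos hd, if_pos hone, hq', hr', hr0']
      have h2 : (rd - 0).toNat = (rd - 1 - 0).toNat + 1 := by omega
      rw [h2, List.replicate_succ]
      simp
  · -- rd = 1: the remainder is 0 and the loop ends after one step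
    have hrd1 : rd = 1 := by omega
    have hr0' : PySem.Int.mod rb rd = 0 := by omega
    rw [if_neg (by omega : ¬ 0 < PySem.Int.mod rb rd)] at hceil
    rw [hceil]
    unfold pvCanon
    rw [if_pos hd, if_neg hone, hr0']
    have h2 : (rd - 0).toNat = 1 := by omega
    rw [h2]
    simp

-- B's loop produces the canonical list after the accumulator
theorem pv_aux_canon (rb rd : Int) (bits : List Int) :
    compute_number_of_bits_altAux bits rb rd = bits ++ pvCanon rb rd := by
  by_cases hd : 0 < rd
  · rw [compute_number_of_bits_altAux]
    simp only [if_pos hd]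
    rw [pv_aux_canon (rb - -(PySem.Int.floordiv (-rb) rd)) (rd - 1),
        pv_canon_step rb rd hd]
    simp
  · rw [compute_number_of_bits_altAux]
    unfold pvCanon
    rw [if_neg hd, if_neg hd]
    simp
termination_by rd.toNat
decreasing_by all_goals omega

-- ===== VERDICT (by name: the statement is the Claim_ definition above) =====
theorem compute_number_of_bits_spec : Claim_equal_compute_number_of_bits := by
  intro b d _
  unfold Spec_compute_number_of_bits compute_number_of_bits_alt
  rw [pv_A_canon, pv_aux_canon]
  simp
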